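-- pv_equiv track=rewrite | github.com/aditya-vk/jarvis-Chatilyzer | analyzer.py | getNumberOfWords
-- ===== SOURCE A (Python) =====
-- def getNumberOfWords(chatList):
--     '''
--     Returns the number of words sent by each speaker
--     @param chatList The list of timestamps, speaker, and content
--     @param startDate The start date to compute frequency from
--     @param endDate The end date to compute frequency upto
--     '''
--     numberOfWords = {}
--     for chat in chatList:
--         speaker = chat[1]
--         text = chat[2]
--         currentNumberOfWords = len(text.split())
--         if speaker not in numberOfWords.keys():
--             numberOfWords[speaker] = currentNumberOfWords
--         else:
--             numberOfWords[speaker] += currentNumberOfWords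
--     return numberOfWords
-- ===== SOURCE B (Python) =====
-- def getNumberOfWords(chatList):
--     speakers = []
--     for chat in chatList:
--         if chat[1] not in speakers:
--             speakers.append(chat[1])
--     return {s: sum(len(chat[2].split()) for chat in chatList if chat[1] == s)
--             for s in speakers}
-- ===== Notes on version B (the rewrite author's own statement) =====
-- stated objective: alternative
-- what changed: Replaces the incremental counting dict with a two-phase grouping: first collect the speakers in order of first appearance, then build the result by summing each speaker's word counts over the whole list in one comprehension.
import Mathlib
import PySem

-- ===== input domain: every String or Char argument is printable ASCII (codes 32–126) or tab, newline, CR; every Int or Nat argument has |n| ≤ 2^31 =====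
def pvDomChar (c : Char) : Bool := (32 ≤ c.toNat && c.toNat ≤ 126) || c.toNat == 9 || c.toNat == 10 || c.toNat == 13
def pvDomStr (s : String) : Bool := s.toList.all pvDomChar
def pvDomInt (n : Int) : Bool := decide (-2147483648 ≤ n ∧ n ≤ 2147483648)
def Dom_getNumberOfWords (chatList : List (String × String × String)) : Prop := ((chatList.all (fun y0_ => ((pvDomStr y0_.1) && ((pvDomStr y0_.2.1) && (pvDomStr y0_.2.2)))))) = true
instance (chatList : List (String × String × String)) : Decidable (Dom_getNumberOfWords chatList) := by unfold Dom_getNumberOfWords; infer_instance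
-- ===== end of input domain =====

-- B replaces A's incremental counting dict with a two-phase grouping (first-appearance
-- speaker list, then per-speaker sums over the whole list); alternative decomposition, same results.


-- ===== PORT A =====
def getNumberOfWords (chatList : List (String × String × String)) : List (String × Int) :=
  (chatList.foldl (fun d chat =>
      let speaker := chat.2.1
      let c : Int := ((PySem.Str.split₀ chat.2.2).length : Int)
      if d.contains speaker then d.insert speaker (d.getD speaker 0 + c)
      else d.insert speaker c)
    PySem.Dict.empty).items

-- ===== PORT B =====
-- sum(len(chat[2].split()) for chat in chatList if chat[1] == s)
def wordSumFor (chatList : List (String × String × String)) (s : String) : Int :=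
  ((chatList.filter (fun chat => chat.2.1 == s)).map
    (fun chat => ((PySem.Str.split₀ chat.2.2).length : Int))).sum

def getNumberOfWords_alt (chatList : List (String × String × String)) : List (String × Int) :=
  let speakers := chatList.foldl (fun acc chat => PySem.Set.add acc chat.2.1) PySem.Set.empty
  speakers.map (fun s => (s, wordSumFor chatList s))

-- ===== PRECONDITION & SPEC =====
def Spec_getNumberOfWords (chatList : List (String × String × String)) (out : List (String × Int)) : Prop := out = getNumberOfWords_alt chatList
instance (chatList : List (String × String × String)) (out : List (String × Int)) : Decidable (Spec_getNumberOfWords chatList out) := by unfold Spec_getNumberOfWords; infer_instance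

-- ===== CLAIM (what is proved, stated in full; the proofs are below) =====
def Claim_equal_getNumberOfWords : Prop := ∀ (chatList : List (String × String × String)), Dom_getNumberOfWords chatList → Spec_getNumberOfWords chatList (getNumberOfWords chatList)

-- ===== LEMMAS AND PROOFS =====

-- A's loop body: both branches are a single insert of (old value or 0) + word count.
lemma stepA_eq (d : PySem.Dict String Int) (chat : String × String × String) :
    (let speaker := chat.2.1
     let c : Int := ((PySem.Str.split₀ chat.2.2).length : Int)
     if d.contains speaker then d.insert speaker (d.getD speaker 0 + c)
     else d.insert speaker c)
    = d.insert chat.2.1 (d.getD chat.2.1 0 + ((PySem.Str.split₀ chat.2.2).length : Int)) := by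
  by_cases h : d.contains chat.2.1
  · simp [h]
  · simp only [Bool.not_eq_true] at h
    rw [PySem.Dict.getD_of_not_contains]
    · simp [h]
    · exact h

lemma foldA_eq (chatList : List (String × String × String)) (d : PySem.Dict String Int) :
    chatList.foldl (fun d chat =>
      let speaker := chat.2.1
      let c : Int := ((PySem.Str.split₀ chat.2.2).length : Int)
      if d.contains speaker then d.insert speaker (d.getD speaker 0 + c)
      else d.insert speaker c) d
    = chatList.foldl (fun d chat =>
        d.insert chat.2.1 (d.getD chat.2.1 0 + ((PySem.Str.split₀ chat.2.2).length : Int))) d := by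
  induction chatList generalizing d with
  | nil => rfl
  | cons x xs ih => rw [List.foldl_cons, List.foldl_cons, stepA_eq]; exact ih _

lemma getD_foldA (chatList : List (String × String × String)) (d : PySem.Dict String Int)
    (k : String) :
    (chatList.foldl (fun d chat =>
        d.insert chat.2.1 (d.getD chat.2.1 0 + ((PySem.Str.split₀ chat.2.2).length : Int))) d).getD k 0
    = d.getD k 0 + wordSumFor chatList k := by
  induction chatList generalizing d with
  | nil => simp [wordSumFor]
  | cons x xs ih =>
    simp only [List.foldl_cons]
    rw [ih]
    by_cases h : k = x.2.1
    · simp [h, wordSumFor]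
      ring
    · simp [PySem.Dict.getD_insert, h, wordSumFor, Ne.symm h]

lemma speakers_eq (chatList : List (String × String × String)) :
    chatList.foldl (fun acc chat => PySem.Set.add acc chat.2.1) PySem.Set.empty
    = PySem.Set.ofList (chatList.map (·.2.1)) := by
  rw [PySem.Set.ofList_eq_foldl, ← List.foldl_map]
  rfl

-- ===== VERDICT (by name: the statement is the Claim_ definition above) =====
theorem getNumberOfWords_spec : Claim_equal_getNumberOfWords := by
  intro chatList _
  unfold Spec_getNumberOfWords getNumberOfWords getNumberOfWords_alt
  rw [foldA_eq]
  rw [PySem.Dict.items_eq_map_keys _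
    (PySem.Dict.nodup_keys_foldl_insert_key _ _ _ _ PySem.Dict.nodup_keys_empty) 0]
  rw [PySem.Dict.keys_foldl_insert_key, speakers_eq]
  simp [PySem.Set.update, getD_foldA, PySem.Set.ofList_eq_foldl]
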